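-- pv_equiv track=rewrite | github.com/Ansai-2000/CodingTestStudy | 프로그래머스/unrated/160585. 혼자서 하는 틱택토/혼자서 하는 틱택토.py | tic2
-- ===== SOURCE A (Python) =====
-- def tic2(board,y,x,o,n):
--     if n==3:
--         return True
--     if y < 0 or y >= 3 or x < 0 or x >= 3:
--         return False
--     if board[y][x] == o:
--         return tic2(board,y+1,x,o,n+1)
--     else:
--         return False
-- ===== SOURCE B (Python) =====
-- def tic2(board, y, x, o, n):
--     if n >= 3:
--         return n == 3
--     for i in range(3 - n):
--         yy = y + i
--         if yy < 0 or yy >= 3 or x < 0 or x >= 3: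
--             return False
--         if board[yy][x] != o:
--             return False
--     return True
-- ===== Notes on version B (the rewrite author's own statement) =====
-- stated objective: simpler
-- what changed: Replaces A's recursion (carrying y and n upward until n==3) by an iterative bounded loop over the column cells, with the constant n>=3 cases guarded up front by a single comparison.
import Mathlib
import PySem

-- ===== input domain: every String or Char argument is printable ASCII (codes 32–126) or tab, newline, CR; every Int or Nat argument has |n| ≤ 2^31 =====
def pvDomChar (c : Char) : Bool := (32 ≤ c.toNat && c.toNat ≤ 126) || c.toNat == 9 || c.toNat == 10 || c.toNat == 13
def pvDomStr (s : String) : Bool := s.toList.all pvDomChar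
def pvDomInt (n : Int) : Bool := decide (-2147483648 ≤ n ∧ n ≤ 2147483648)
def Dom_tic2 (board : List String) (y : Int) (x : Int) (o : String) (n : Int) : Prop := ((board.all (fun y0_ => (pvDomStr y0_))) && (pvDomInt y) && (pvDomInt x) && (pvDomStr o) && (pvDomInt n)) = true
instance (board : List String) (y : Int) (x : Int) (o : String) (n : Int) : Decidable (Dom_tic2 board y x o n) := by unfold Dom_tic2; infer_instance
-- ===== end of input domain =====

-- B replaces A's upward recursion by an iterative bounded column scan with the constant
-- n ≥ 3 cases guarded up front (simpler decomposition; same cost).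

-- ===== PORT A =====
-- board[i][x] as Python evaluates it: none = IndexError (on either subscript).
def pvCell (board : List String) (i : Int) (x : Int) : Option Char :=
  (PySem.List.pyGet? board i).bind (fun r => PySem.Str.pyGet? r x)

-- Literal port of A's recursion; the `none` branch is Python's IndexError, excluded by Pre_tic2.
def tic2 (board : List String) (y : Int) (x : Int) (o : String) (n : Int) : Bool :=
  if n = 3 then true
  else if h : y < 0 ∨ 3 ≤ y ∨ x < 0 ∨ 3 ≤ x then false
  else
    match pvCell board y x with
    | some c => if String.mk [c] = o then tic2 board (y + 1) x o (n + 1) else false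
    | none => false
termination_by (3 - y).toNat
decreasing_by push_neg at h; omega

-- ===== PORT B =====
-- The `for i in range(3 - n)` loop of Source B with its early returns; `none` = IndexError, excluded by Pre_tic2.
def tic2AltLoop (board : List String) (y : Int) (x : Int) (o : String) (stop : Int) (i : Int) : Bool :=
  if h : stop ≤ i then true
  else
    if y + i < 0 ∨ 3 ≤ y + i ∨ x < 0 ∨ 3 ≤ x then false
    else
      match pvCell board (y + i) x with
      | some c => if String.mk [c] ≠ o then false else tic2AltLoop board y x o stop (i + 1)
      | none => false
termination_by (stop - i).toNat
decreasing_by omega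

def tic2_alt (board : List String) (y : Int) (x : Int) (o : String) (n : Int) : Bool :=
  if 3 ≤ n then decide (n = 3)
  else tic2AltLoop board y x o (3 - n) 0

-- ===== PRECONDITION & SPEC =====
-- A raises IndexError at step i exactly when every earlier scanned cell existed and matched o,
-- no step before or at i hit n==3, the in-bounds guard passed at step i, and cell (y+i, x) is
-- missing (row y+i absent, or shorter than x+1).
def pvRaiseAt (board : List String) (y : Int) (x : Int) (o : String) (n : Int) (i : Int) : Prop :=
  (n < 3 - i ∨ 3 < n) ∧ 0 ≤ y ∧ y + i < 3 ∧ 0 ≤ x ∧ x < 3 ∧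
  pvCell board (y + i) x = none ∧
  (∀ j ∈ [(0 : Int), 1], j < i → (pvCell board (y + j) x).map (fun c => String.mk [c]) = some o)

-- Pre_tic2 excludes EXACTLY the inputs on which the Python A raises (IndexError on board[y][x]);
-- on every input A returns a value, Pre_tic2 holds.
def Pre_tic2 (board : List String) (y : Int) (x : Int) (o : String) (n : Int) : Prop :=
  ¬ ∃ i ∈ [(0 : Int), 1, 2], pvRaiseAt board y x o n i
instance (board : List String) (y : Int) (x : Int) (o : String) (n : Int) : Decidable (Pre_tic2 board y x o n) := by unfold Pre_tic2 pvRaiseAt; infer_instance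

def pvWitness_tic2 : List String × Int × Int × String × Int := (["xox", "oxo", "xox"], 0, 0, "x", 0)

def Spec_tic2 (board : List String) (y : Int) (x : Int) (o : String) (n : Int) (out : Bool) : Prop := out = tic2_alt board y x o n
instance (board : List String) (y : Int) (x : Int) (o : String) (n : Int) (out : Bool) : Decidable (Spec_tic2 board y x o n out) := by unfold Spec_tic2; infer_instance

-- ===== CLAIM (what is proved, stated in full; the proofs are below) =====
def Claim_equal_tic2 : Prop := ∀ (board : List String) (y : Int) (x : Int) (o : String) (n : Int), Dom_tic2 board y x o n → Pre_tic2 board y x o n → Spec_tic2 board y x o n (tic2 board y x o n)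

-- ===== LEMMAS AND PROOFS =====

-- With n > 3, A's recursion can never hit n == 3, so every branch yields false.
lemma tic2_gt3 : ∀ (k : Nat) (board : List String) (y x : Int) (o : String) (n : Int),
    3 < n → (3 - y).toNat ≤ k → tic2 board y x o n = false := by
  intro k
  induction k with
  | zero =>
    intro board y x o n hn hk
    rw [tic2]
    have hy : 3 ≤ y := by omega
    simp [show n ≠ 3 by omega, hy]
  | succ k ih =>
    intro board y x o n hn hk
    rw [tic2]
    simp only [show n ≠ 3 by omega, if_false]
    split
    · rfl
    · rename_i h
      push_neg at h
      cases hc : pvCell board y x with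
      | none => rfl
      | some c =>
        by_cases he : String.mk [c] = o
        · simp [he, ih board (y + 1) x o (n + 1) (by omega) (by omega)]
        · simp [he]

-- A's recursion at (y+i, n0+i) coincides with B's loop body at index i (stop = 3 - n0).
lemma tic2_loop_eq : ∀ (k : Nat) (board : List String) (y x : Int) (o : String) (n0 i : Int),
    n0 < 3 → 0 ≤ i → n0 + i ≤ 3 → ((3 - n0) - i).toNat ≤ k →
    tic2 board (y + i) x o (n0 + i) = tic2AltLoop board y x o (3 - n0) i := by
  intro k
  induction k with
  | zero =>
    intro board y x o n0 i hn0 hi hle hk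
    have heq : n0 + i = 3 := by omega
    rw [tic2, tic2AltLoop]
    simp [heq, show (3 : Int) - n0 ≤ i by omega]
  | succ k ih =>
    intro board y x o n0 i hn0 hi hle hk
    by_cases hstop : (3 : Int) - n0 ≤ i
    · have heq : n0 + i = 3 := by omega
      rw [tic2, tic2AltLoop]
      simp [heq, hstop]
    · have hne : n0 + i ≠ 3 := by omega
      rw [tic2, tic2AltLoop]
      simp only [hne, if_false, dif_neg hstop]
      split
      · rfl
      · rename_i h
        cases hc : pvCell board (y + i) x with
        | none => rfl
        | some c =>
          by_cases he : String.mk [c] = o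
          · simp only [he, if_true, ne_eq, not_true_eq_false, if_false]
            have h1 : y + i + 1 = y + (i + 1) := by ring
            have h2 : n0 + i + 1 = n0 + (i + 1) := by ring
            rw [h1, h2]
            exact ih board y x o n0 (i + 1) hn0 (by omega) (by omega) (by omega)
          · simp [he]

-- ===== VERDICT (by name: the statement is the Claim_ definition above) =====
theorem tic2_spec : Claim_equal_tic2 := by
  unfold Claim_equal_tic2
  intro board y x o n _hdom _hpre
  unfold Spec_tic2 tic2_alt
  rcases lt_trichotomy n 3 with hn | hn | hn
  · have := tic2_loop_eq ((3 - n).toNat) board y x o n 0 hn le_rfl (by omega) (by omega)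
    simpa [show ¬ (3 : Int) ≤ n by omega] using this
  · subst hn
    rw [tic2]
    simp
  · rw [tic2_gt3 ((3 - y).toNat) board y x o n hn le_rfl]
    simp [show (3 : Int) ≤ n by omega, show n ≠ 3 by omega]
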